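-- pv_equiv track=rewrite | github.com/tywenrick3/Data-Structures-Algorithms-Work | codewars.py | middle_me
-- ===== SOURCE A (Python) =====
-- def middle_me(N, X, Y):
--     mid = N // 2
--     str = ''
--     for i in range(N+1):
--         if i == mid:
--             str += X
--         else:
--             str += Y
--     return str
-- ===== SOURCE B (Python) =====
-- def middle_me(N, X, Y):
--     mid = N // 2
--     return Y * mid + X + Y * (N - mid)
-- ===== Notes on version B (the rewrite author's own statement) =====
-- stated objective: simpler
-- what changed: Replaces the per-character loop with an if-branch by a closed-form concatenation of three blocks (mid copies of Y, X, N-mid copies of Y); Pre_ excludes negative N, a degenerate count outside the task's natural domain, where neither value is specified (A's empty loop yields '' while the closed form yields X).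
-- outside the precondition, e.g. on middle_me(-1, 'x', 'y'): A returns '', B returns 'x'; on middle_me(-4, 'ab', 'y'): A returns '', B returns 'ab'
import Mathlib
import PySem

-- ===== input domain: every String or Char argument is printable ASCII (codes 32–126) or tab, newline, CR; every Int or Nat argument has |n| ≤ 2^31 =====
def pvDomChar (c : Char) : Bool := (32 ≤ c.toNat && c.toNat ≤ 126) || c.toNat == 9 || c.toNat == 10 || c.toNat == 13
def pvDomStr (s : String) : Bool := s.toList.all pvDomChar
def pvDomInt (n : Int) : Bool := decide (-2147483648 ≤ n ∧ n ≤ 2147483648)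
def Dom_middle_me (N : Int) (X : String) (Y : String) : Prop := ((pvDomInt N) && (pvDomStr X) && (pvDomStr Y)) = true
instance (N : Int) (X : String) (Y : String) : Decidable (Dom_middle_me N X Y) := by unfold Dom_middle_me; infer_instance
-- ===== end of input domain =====

-- B replaces A's per-character loop with a closed-form concatenation of three blocks
-- (mid copies of Y, then X, then N - mid copies of Y); objective: simpler.

-- ===== PORT A =====
def middle_me (N : Int) (X : String) (Y : String) : String :=
  let mid := PySem.Int.floordiv N 2
  (PySem.List.pyRange 0 (N + 1) 1).foldl
    (fun s i => if i == mid then s ++ X else s ++ Y) ""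

-- ===== PORT B =====
-- Python's `Y * n` (string repetition; empty for n ≤ 0), ported by hand — exact.
def strRepeat (Y : String) (n : Int) : String :=
  String.join (List.replicate n.toNat Y)

def middle_me_alt (N : Int) (X : String) (Y : String) : String :=
  let mid := PySem.Int.floordiv N 2
  strRepeat Y mid ++ X ++ strRepeat Y (N - mid)

-- ===== PRECONDITION & SPEC =====
-- Pre_ excludes negative N, a degenerate count outside the task's natural domain on which
-- neither value is specified: A's loop body never runs and returns '' while the closed form returns X.
def Pre_middle_me (N : Int) (X : String) (Y : String) : Prop := 0 ≤ N
instance (N : Int) (X : String) (Y : String) : Decidable (Pre_middle_me N X Y) := by unfold Pre_middle_me; infer_instance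
def pvWitness_middle_me : Int × String × String := (4, "x", "yz")

def Spec_middle_me (N : Int) (X : String) (Y : String) (out : String) : Prop := out = middle_me_alt N X Y
instance (N : Int) (X : String) (Y : String) (out : String) : Decidable (Spec_middle_me N X Y out) := by unfold Spec_middle_me; infer_instance

-- ===== CLAIM (what is proved, stated in full; the proofs are below) =====
def Claim_equal_middle_me : Prop := ∀ (N : Int) (X : String) (Y : String), Dom_middle_me N X Y → Pre_middle_me N X Y → Spec_middle_me N X Y (middle_me N X Y)

-- ===== LEMMAS AND PROOFS =====

theorem foldl_str_append : ∀ (l : List String) (a : String),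
    l.foldl (· ++ ·) a = a ++ l.foldl (· ++ ·) "" := by
  intro l
  induction l with
  | nil => intro a; simp
  | cons x xs ih =>
      intro a
      simp only [List.foldl_cons]
      rw [ih (a ++ x), ih ("" ++ x)]
      simp [String.append_assoc]

-- A's loop in closed form: fold-append equals joining the mapped list.
theorem foldl_ite_append (mid : Int) (X Y : String) :
    ∀ (l : List Int) (a : String),
      l.foldl (fun s i => if i == mid then s ++ X else s ++ Y) a
        = a ++ String.join (l.map (fun i => if i == mid then X else Y)) := by
  intro l
  induction l with
  | nil => intro a; simp [String.join]
  | cons x xs ih =>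
      intro a
      simp only [List.foldl_cons, List.map_cons]
      rw [show (if x == mid then a ++ X else a ++ Y)
            = a ++ (if x == mid then X else Y) by split <;> rfl, ih]
      show _ = a ++ List.foldl (· ++ ·) "" _
      rw [List.foldl_cons, foldl_str_append]
      simp [String.join, String.append_assoc]

-- the mapped range splits into the three blocks
theorem range_map_eq_blocks (n m : Nat) (hm : m < n) (X Y : String) :
    (List.range n).map (fun (k : Nat) => if (k : Int) == (m : Int) then X else Y)
      = List.replicate m Y ++ [X] ++ List.replicate (n - m - 1) Y := by
  apply List.ext_getElem
  · simp; omega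
  · intro i h1 h2
    have hin : i < n := by simpa using h1
    simp only [List.getElem_map, List.getElem_range]
    rcases lt_trichotomy i m with hlt | heq | hgt
    · have hi : ¬ ((i : Int) = (m : Int)) := by exact_mod_cast Nat.ne_of_lt hlt
      simp only [beq_iff_eq, hi, if_false]
      rw [List.getElem_append_left (by simp; omega),
          List.getElem_append_left (by simp; omega)]
      simp
    · have hi : ((i : Int) = (m : Int)) := by exact_mod_cast heq
      simp only [hi, beq_self_eq_true, if_true]
      rw [List.getElem_append_left (by simp; omega),
          List.getElem_append_right (by simp; omega)]
      simp [heq]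
    · have hi : ¬ ((i : Int) = (m : Int)) := by exact_mod_cast Nat.ne_of_gt hgt
      simp only [beq_iff_eq, hi, if_false]
      rw [List.getElem_append_right (by simp; omega)]
      simp

-- ===== VERDICT (by name: the statement is the Claim_ definition above) =====
theorem middle_me_spec : Claim_equal_middle_me := by
  intro N X Y _ hN
  replace hN : (0 : Int) ≤ N := hN
  unfold Spec_middle_me middle_me middle_me_alt strRepeat
  have hfd : PySem.Int.floordiv N 2 = N / 2 :=
    PySem.Int.floordiv_eq_ediv_of_pos (by omega)
  have hmid_le : N / 2 ≤ N := by omega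
  have hmid_nonneg : (0 : Int) ≤ N / 2 := by omega
  simp only [hfd]
  rw [PySem.List.pyRange_one, foldl_ite_append]
  simp only [List.map_map, Function.comp_def, zero_add,
    show (N + 1 - 0).toNat = (N + 1).toNat by omega]
  have hcast : (((N / 2).toNat : Int)) = N / 2 := by omega
  have hlt : (N / 2).toNat < (N + 1).toNat := by omega
  rw [← hcast, range_map_eq_blocks (N + 1).toNat (N / 2).toNat hlt X Y]
  have hsub : (N + 1).toNat - (N / 2).toNat - 1 = (N - N / 2).toNat := by omega
  have hmax : max (N / 2) 0 = N / 2 := by omega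
  simp only [hsub, String.join, List.foldl_append, List.foldl_cons]
  rw [foldl_str_append _ ((List.replicate ((N / 2)).toNat Y).foldl (· ++ ·) "" ++ X)]
  rw [foldl_str_append (List.replicate (N - N / 2).toNat Y) _]
  simp [String.append_assoc, hmax]
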